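-- pv_equiv track=rewrite | github.com/gabriellaec/desoft-analise-exercicios | backup/user_292/ch165_2020_06_19_17_55_17_860412.py | estado
-- ===== SOURCE A (Python) =====
-- def estado (dic):
--     estado_populacao = {}
--     for i,n in dic.items():
--         h = []
--         for x in n.values():
--             h.append(x)
--         z = 0
--         for y in h:
--             z += y
--         estado_populacao[i] = z
--     hab_Est = 0
--     mais_pop = ''
--     for i,n in estado_populacao.items():
--         if n > hab_Est:
--             hab_Est = n
--             mais_pop = i
--     return mais_pop
-- ===== SOURCE B (Python) =====
-- def estado(dic):
--     best = 0
--     mais_pop = ''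
--     for i, n in dic.items():
--         total = sum(n.values())
--         if total > best:
--             best = total
--             mais_pop = i
--     return mais_pop
-- ===== Notes on version B (the rewrite author's own statement) =====
-- stated objective: simpler
-- what changed: B fuses A's two phases (building an intermediate state->population dict, then a separate max-scan over it) into one pass that sums each state's values and updates the running best immediately, eliminating the intermediate dict and the inner append loop.
import Mathlib
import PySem

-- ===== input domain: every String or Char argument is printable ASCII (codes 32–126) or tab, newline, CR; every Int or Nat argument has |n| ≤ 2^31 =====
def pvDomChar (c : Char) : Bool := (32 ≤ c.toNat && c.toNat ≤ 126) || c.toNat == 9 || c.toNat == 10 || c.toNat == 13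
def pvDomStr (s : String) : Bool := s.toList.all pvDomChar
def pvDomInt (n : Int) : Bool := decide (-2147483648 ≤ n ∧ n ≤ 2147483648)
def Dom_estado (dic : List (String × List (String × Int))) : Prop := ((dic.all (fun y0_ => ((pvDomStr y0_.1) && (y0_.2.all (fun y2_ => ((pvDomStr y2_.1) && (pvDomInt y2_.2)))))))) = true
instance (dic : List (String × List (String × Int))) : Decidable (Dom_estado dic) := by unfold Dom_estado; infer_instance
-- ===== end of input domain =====

-- B fuses A's two phases (intermediate dict + max-scan) into one pass, updating the running best as it sums each state.

-- ===== PORT A =====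
def estado (dic : List (String × List (String × Int))) : String :=
  let ep : PySem.Dict String Int :=
    dic.foldl (fun d p =>
      let h := p.2.foldl (fun h (x : String × Int) => h ++ [x.2]) []
      let z := h.foldl (fun z y => z + y) 0
      d.insert p.1 z) PySem.Dict.empty
  let r := ep.items.foldl (fun (s : Int × String) p =>
      if p.2 > s.1 then (p.2, p.1) else s) ((0 : Int), "")
  r.2

-- ===== PORT B =====
def estado_alt (dic : List (String × List (String × Int))) : String :=
  (dic.foldl (fun (s : Int × String) p =>
      let total := (p.2.map Prod.snd).sum
      if total > s.1 then (total, p.1) else s) ((0 : Int), "")).2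

-- ===== PRECONDITION & SPEC =====
-- Pre_ requires distinct keys at both dict levels: the association lists encode Python dicts,
-- which cannot contain duplicate keys, so no Python input corresponds to a duplicate-key list.
def Pre_estado (dic : List (String × List (String × Int))) : Prop :=
  (dic.map Prod.fst).Nodup ∧ ∀ p ∈ dic, (p.2.map Prod.fst).Nodup
instance (dic : List (String × List (String × Int))) : Decidable (Pre_estado dic) := by
  unfold Pre_estado; infer_instance

def pvWitness_estado : (List (String × List (String × Int))) :=
  [("sp", [("a", 3), ("b", 4)]), ("rj", [("c", 7)])]

def Spec_estado (dic : List (String × List (String × Int))) (out : String) : Prop := out = estado_alt dic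
instance (dic : List (String × List (String × Int))) (out : String) : Decidable (Spec_estado dic out) := by unfold Spec_estado; infer_instance

-- ===== CLAIM (what is proved, stated in full; the proofs are below) =====
def Claim_equal_estado : Prop := ∀ (dic : List (String × List (String × Int))), Dom_estado dic → Pre_estado dic → Spec_estado dic (estado dic)

-- ===== LEMMAS AND PROOFS =====

-- the per-state total A computes (append loop + add loop) is the sum of the values
theorem estado_inner_sum (l : List (String × Int)) :
    (l.foldl (fun h (x : String × Int) => h ++ [x.2]) []).foldl (fun z y => z + y) 0
      = (l.map Prod.snd).sum := by
  rw [PySem.List.foldl_append_singleton_eq_map]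
  exact (List.sum_eq_foldl).symm

-- ===== VERDICT (by name: the statement is the Claim_ definition above) =====
theorem estado_spec : Claim_equal_estado := by
  intro dic _ hpre
  unfold Spec_estado estado estado_alt
  dsimp only
  have hfresh : ∀ p ∈ dic, (PySem.Dict.empty : PySem.Dict String Int).contains p.1 = false := by
    intro p _; simp
  have hitems := PySem.Dict.items_foldl_insert_fresh dic Prod.fst
      (fun p : String × List (String × Int) =>
        (p.2.foldl (fun h (x : String × Int) => h ++ [x.2]) []).foldl (fun z y => z + y) 0)
      PySem.Dict.empty hfresh hpre.1
  simp only [hitems]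
  simp only [PySem.Dict.empty, List.nil_append, List.foldl_map, estado_inner_sum]
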